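-- pv_equiv track=rewrite | github.com/ShoqZSon/Excel_Parser | myParser.py | packData
-- ===== SOURCE A (Python) =====
-- def packData(data, subjects):
--     sub_day = []
--     group = []
--     final = []
--     i = 0
--     for entry in data:
--         sub_day.append(subjects[i])
--         sub_day.append(entry)
--         group.append(sub_day)
--         sub_day = []
--         i += 1
--         if i == len(subjects):
--             final.append(group)
--             group = []
--             i = 0
--
--     return final
-- ===== SOURCE B (Python) =====
-- def packData(data, subjects):
--     n = len(subjects)
--     final = []
--     while n and len(data) >= n:
--         final.append([[s, e] for s, e in zip(subjects, data)])
--         data = data[n:]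
--     return final
-- ===== Notes on version B (the rewrite author's own statement) =====
-- stated objective: alternative
-- what changed: Instead of cycling an index over subjects with a counter and conditional group flush, B chunks the data first: it repeatedly zips subjects positionally with the front of data to form one group and drops a subjects-sized chunk, so there is no cyclic index, modulo or counter at all; the trailing incomplete chunk never forms a group.
import Mathlib
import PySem

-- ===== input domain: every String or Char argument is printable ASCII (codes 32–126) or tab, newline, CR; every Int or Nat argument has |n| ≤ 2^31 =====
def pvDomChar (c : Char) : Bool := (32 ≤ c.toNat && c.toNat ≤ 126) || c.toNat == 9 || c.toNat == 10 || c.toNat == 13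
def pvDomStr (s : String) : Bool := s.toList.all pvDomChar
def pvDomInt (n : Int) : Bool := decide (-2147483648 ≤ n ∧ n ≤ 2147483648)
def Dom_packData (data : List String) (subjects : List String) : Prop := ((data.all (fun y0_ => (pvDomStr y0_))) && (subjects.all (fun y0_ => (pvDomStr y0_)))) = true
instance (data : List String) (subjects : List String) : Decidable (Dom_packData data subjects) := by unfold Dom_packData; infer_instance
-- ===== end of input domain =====

-- B chunks the data first and zips subjects positionally with each chunk, instead of A's
-- cyclic index with counter and conditional group flush (objective: alternative; same cost).

-- ===== PORT A =====
-- A's loop over data with state (final, group, i); subjects[i] is in range on every input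
-- Pre_ admits, so pyGetD's default is never used there.
def packData (data : List String) (subjects : List String) : List (List (List String)) :=
  let st := data.foldl
    (fun (st : List (List (List String)) × List (List String) × Nat) entry =>
      let final := st.1
      let group := st.2.1
      let i := st.2.2
      let sub_day := [PySem.List.pyGetD subjects (Int.ofNat i) "", entry]
      let group := group ++ [sub_day]
      let i := i + 1
      if i = subjects.length then (final ++ [group], [], 0) else (final, group, i))
    ([], [], 0)
  st.1

-- ===== PORT B =====
-- Source B's while loop: rebinds data := data[n:] each turn, so it is the structural recursion
-- on data with accumulator `final`; zip(subjects, data) is List.zip (both truncate).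
def packDataAltLoop (subjects : List String) (data : List String)
    (final : List (List (List String))) : List (List (List String)) :=
  if h : subjects.length = 0 ∨ data.length < subjects.length then final
  else packDataAltLoop subjects (data.drop subjects.length)
    (final ++ [(subjects.zip data).map (fun p => [p.1, p.2])])
termination_by data.length
decreasing_by simp only [List.length_drop]; omega

def packData_alt (data : List String) (subjects : List String) : List (List (List String)) :=
  packDataAltLoop subjects data []

-- ===== PRECONDITION & SPEC =====
-- Pre_ excludes exactly the inputs where A raises IndexError: nonempty data with empty subjects.
def Pre_packData (data : List String) (subjects : List String) : Prop :=
  subjects ≠ [] ∨ data = []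
instance (data : List String) (subjects : List String) : Decidable (Pre_packData data subjects) := by unfold Pre_packData; infer_instance

def pvWitness_packData : List String × List String := (["a", "b", "c"], ["mon", "tue"])

def Spec_packData (data : List String) (subjects : List String) (out : List (List (List String))) : Prop := out = packData_alt data subjects
instance (data : List String) (subjects : List String) (out : List (List (List String))) : Decidable (Spec_packData data subjects out) := by unfold Spec_packData; infer_instance

-- ===== CLAIM (what is proved, stated in full; the proofs are below) =====
def Claim_equal_packData : Prop := ∀ (data : List String) (subjects : List String), Dom_packData data subjects → Pre_packData data subjects → Spec_packData data subjects (packData data subjects)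

-- ===== LEMMAS AND PROOFS =====

-- A's loop body as a named step function (definitionally equal to the lambda in the port).
def stepA (subjects : List String)
    (st : List (List (List String)) × List (List String) × Nat) (entry : String) :
    List (List (List String)) × List (List String) × Nat :=
  let final := st.1
  let group := st.2.1
  let i := st.2.2
  let sub_day := [PySem.List.pyGetD subjects (Int.ofNat i) "", entry]
  let group := group ++ [sub_day]
  let i := i + 1
  if i = subjects.length then (final ++ [group], [], 0) else (final, group, i)

theorem packData_eq_foldl (data subjects : List String) :
    packData data subjects = (data.foldl (stepA subjects) ([], [], 0)).1 := rfl

-- Flat pair list starting at global index k: entry j gets subjects[(k+j) % n].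
def pairsAux (subjects : List String) : Nat → List String → List (List String)
  | _, [] => []
  | k, e :: rest => [subjects.getD (k % subjects.length) "", e] :: pairsAux subjects (k + 1) rest

-- Reference chunking: full groups of n = subjects.length pairs, trailing remainder dropped.
def packRec (subjects : List String) (data : List String) : List (List (List String)) :=
  if h : subjects.length = 0 ∨ data.length < subjects.length then []
  else pairsAux subjects 0 (data.take subjects.length) :: packRec subjects (data.drop subjects.length)
termination_by data.length
decreasing_by simp only [List.length_drop]; omega

theorem pairsAux_length (subjects : List String) : ∀ (data : List String) (k : Nat),
    (pairsAux subjects k data).length = data.length := by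
  intro data
  induction data with
  | nil => intro k; simp [pairsAux]
  | cons e rest ih => intro k; simp [pairsAux, ih]

theorem pairsAux_getElem (subjects : List String) : ∀ (data : List String) (k j : Nat)
    (h : j < (pairsAux subjects k data).length),
    (pairsAux subjects k data)[j] =
      [subjects.getD ((k + j) % subjects.length) "", data.getD j ""] := by
  intro data
  induction data with
  | nil => intro k j h; simp [pairsAux] at h
  | cons e rest ih =>
    intro k j h
    cases j with
    | zero => simp [pairsAux]
    | succ j =>
      simp only [pairsAux, List.getElem_cons_succ, List.getD_cons_succ]
      rw [ih (k + 1) j (by simpa [pairsAux] using h),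
        show (k + 1) + j = k + (j + 1) by omega]

-- The stepping lemma for A's loop: from state (F, G, i) with i < n it either finishes the
-- current (incomplete) group or flushes one full group and continues from the reset state.
theorem loopA (subjects : List String) :
    ∀ (data : List String) (F : List (List (List String))) (G : List (List String)) (i : Nat),
    i < subjects.length →
    data.foldl (stepA subjects) (F, G, i)
    = (if data.length < subjects.length - i
       then (F, G ++ pairsAux subjects i data, i + data.length)
       else
        (data.drop (subjects.length - i)).foldl (stepA subjects)
          (F ++ [G ++ pairsAux subjects i (data.take (subjects.length - i))], [], 0)) := by
  intro data
  induction data with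
  | nil =>
    intro F G i hi
    simp [pairsAux]
    omega
  | cons e rest ih =>
    intro F G i hi
    have hget : PySem.List.pyGetD subjects (Int.ofNat i) "" = subjects.getD (i % subjects.length) "" := by
      rw [show (Int.ofNat i) = ((i : Nat) : Int) from rfl, PySem.List.pyGetD_natCast]
      rw [Nat.mod_eq_of_lt hi]
    by_cases hfull : i + 1 = subjects.length
    · -- flush: the group is complete
      simp only [List.foldl_cons, stepA, hfull]
      have hcond : ¬ ((e :: rest).length < subjects.length - i) := by simp; omega
      rw [if_neg hcond]
      have hni : subjects.length - i = 1 := by omega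
      simp [hni, pairsAux, Nat.mod_eq_of_lt hi]
    · simp only [List.foldl_cons, stepA, if_neg hfull]
      rw [ih F (G ++ [[PySem.List.pyGetD subjects (Int.ofNat i) "", e]]) (i + 1) (by omega)]
      by_cases hsmall : rest.length < subjects.length - (i + 1)
      · rw [if_pos hsmall, if_pos (by simp; omega)]
        simp only [pairsAux, hget, Nat.mod_eq_of_lt hi, List.append_assoc, List.cons_append,
          List.nil_append, Prod.mk.injEq, List.length_cons]
        exact ⟨trivial, trivial, by omega⟩
      · rw [if_neg hsmall, if_neg (by simp; omega)]
        have h1 : subjects.length - i = (subjects.length - (i + 1)) + 1 := by omega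
        rw [h1]
        simp [pairsAux, Nat.mod_eq_of_lt hi]

-- Main A-side invariant, with the accumulated `final` list generalized.
theorem loopMain (subjects : List String) (hpos : 0 < subjects.length) :
    ∀ (fuel : Nat) (data : List String), data.length = fuel →
    ∀ F : List (List (List String)),
    (data.foldl (stepA subjects) (F, [], 0)).1 = F ++ packRec subjects data := by
  intro fuel
  induction fuel using Nat.strong_induction_on with
  | _ fuel ih =>
    intro data hlen F
    rw [loopA subjects data F [] 0 hpos]
    by_cases hsmall : data.length < subjects.length
    · rw [if_pos (by omega)]
      rw [packRec, dif_pos (by omega)]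
      simp
    · rw [if_neg (by omega)]
      have hdrop : (data.drop (subjects.length - 0)).length = data.length - subjects.length := by
        simp
      have hm : data.length - subjects.length < fuel := by rw [← hlen]; omega
      rw [ih (data.length - subjects.length) hm _ hdrop
        (F ++ [[] ++ pairsAux subjects 0 (List.take (subjects.length - 0) data)])]
      conv_rhs => rw [packRec]
      rw [dif_neg (by omega)]
      simp

theorem packData_eq_packRec (subjects : List String) (hn : subjects ≠ []) (data : List String) :
    packData data subjects = packRec subjects data := by
  have hpos : 0 < subjects.length := List.length_pos_of_ne_nil hn
  rw [packData_eq_foldl, loopMain subjects hpos data.length data rfl []]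
  simp

-- B-side: zipping subjects with data (which has ≥ n entries) is the first full group.
theorem zip_eq_pairsAux (subjects data : List String)
    (hlen : subjects.length ≤ data.length) :
    (subjects.zip data).map (fun p => [p.1, p.2])
      = pairsAux subjects 0 (data.take subjects.length) := by
  apply List.ext_getElem
  · simp [pairsAux_length]
  · intro j h1 h2
    have hj : j < subjects.length := by
      simp only [List.length_map, List.length_zip, Nat.lt_min] at h1
      exact h1.1
    rw [pairsAux_getElem]
    simp only [List.getElem_map, List.getElem_zip]
    rw [Nat.zero_add, Nat.mod_eq_of_lt hj]
    congr 1
    · exact (List.getD_eq_getElem subjects "" hj).symm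
    · rw [List.getD_eq_getElem _ "" (by simp; omega), List.getElem_take]

-- B's accumulating loop computes the reference chunking.
theorem bLoop_eq (subjects : List String) :
    ∀ (fuel : Nat) (data : List String), data.length = fuel →
    ∀ F : List (List (List String)),
    packDataAltLoop subjects data F = F ++ packRec subjects data := by
  intro fuel
  induction fuel using Nat.strong_induction_on with
  | _ fuel ih =>
    intro data hlen F
    rw [packDataAltLoop, packRec]
    by_cases hstop : subjects.length = 0 ∨ data.length < subjects.length
    · rw [dif_pos hstop, dif_pos hstop]; simp
    · rw [dif_neg hstop, dif_neg hstop]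
      push_neg at hstop
      have hm : (data.drop subjects.length).length < fuel := by
        simp only [List.length_drop]; omega
      rw [ih (data.drop subjects.length).length hm _ rfl]
      rw [zip_eq_pairsAux subjects data hstop.2]
      simp

theorem packData_alt_eq_packRec (subjects data : List String) :
    packData_alt data subjects = packRec subjects data := by
  rw [packData_alt, bLoop_eq subjects data.length data rfl []]
  simp

-- ===== VERDICT (by name: the statement is the Claim_ definition above) =====
theorem packData_spec : Claim_equal_packData := by
  intro data subjects _ hpre
  unfold Spec_packData
  rw [packData_alt_eq_packRec]
  rcases hpre with hn | hd
  · exact packData_eq_packRec subjects hn data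
  · subst hd
    rw [show packData [] subjects = [] from rfl, packRec, dif_pos (by rcases Nat.eq_zero_or_pos subjects.length with h | h; exacts [Or.inl h, Or.inr (by simpa using h)])]
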